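-- pv_equiv track=rewrite | github.com/Houssame-EA/IsotopeTrack | results/results_AI.py | _extract_by_sample
-- ===== SOURCE A (Python) =====
-- def _extract_by_sample(particles, data_context):
--     names = data_context.get('sample_names', [])
--     by_sample = {}
--     for p in particles:
--         src = p.get('source_sample', '')
--         if src:
--             by_sample.setdefault(src, []).append(p)
--     ordered = {}
--     for name in names:
--         if name in by_sample:
--             ordered[name] = by_sample[name]
--     for name, ps in by_sample.items():
--         if name not in ordered:
--             ordered[name] = ps
--     return ordered
-- ===== SOURCE B (Python) =====
-- def _extract_by_sample(particles, data_context):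
--     names = data_context.get('sample_names', [])
--     by_sample = {}
--     for p in particles:
--         src = p.get('source_sample', '')
--         if src:
--             by_sample.setdefault(src, []).append(p)
--     rank = {}
--     for name in names:
--         rank.setdefault(name, len(rank))
--     for k in by_sample:
--         rank.setdefault(k, len(rank))
--     keys = sorted(by_sample, key=rank.__getitem__)
--     return {k: by_sample[k] for k in keys}
-- ===== Notes on version B (the rewrite author's own statement) =====
-- stated objective: alternative
-- what changed: A's two ordering loops over names and by_sample (building a second dict) are replaced by a first-occurrence rank dict plus one stable sort of the grouped keys by rank, from which the result dict is rebuilt in one comprehension.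
import Mathlib
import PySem

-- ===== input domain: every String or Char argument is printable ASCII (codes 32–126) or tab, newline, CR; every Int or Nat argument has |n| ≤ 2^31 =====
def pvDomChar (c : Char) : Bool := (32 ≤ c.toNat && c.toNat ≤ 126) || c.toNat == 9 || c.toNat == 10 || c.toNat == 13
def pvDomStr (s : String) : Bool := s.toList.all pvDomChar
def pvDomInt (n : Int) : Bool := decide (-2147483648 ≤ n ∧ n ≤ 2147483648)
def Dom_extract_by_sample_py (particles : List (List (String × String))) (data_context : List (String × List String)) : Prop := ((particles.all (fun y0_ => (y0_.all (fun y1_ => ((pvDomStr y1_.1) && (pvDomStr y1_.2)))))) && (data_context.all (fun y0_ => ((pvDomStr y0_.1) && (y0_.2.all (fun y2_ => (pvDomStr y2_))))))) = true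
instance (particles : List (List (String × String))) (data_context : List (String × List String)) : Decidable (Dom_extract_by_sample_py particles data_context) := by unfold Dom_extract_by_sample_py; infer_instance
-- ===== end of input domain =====

-- B replaces A's two ordering loops by a first-occurrence rank dict and one stable sort of the grouped keys (objective: alternative decomposition, not faster).

-- ===== PORT A =====
-- helpers shared by both ports: both Pythons contain verbatim this names lookup and grouping pass
def pvNames (data_context : List (String × List String)) : List String :=
  (PySem.Dict.mk data_context).getD "sample_names" []

-- by_sample.setdefault(src, []).append(p)  =  modify src [] (· ++ [p])
def pvBySample (particles : List (List (String × String))) : PySem.Dict String (List (List (String × String))) :=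
  particles.foldl (fun d p =>
    let src := (PySem.Dict.mk p).getD "source_sample" ""
    if src ≠ "" then d.modify src [] (fun l => l ++ [p]) else d) PySem.Dict.empty

def extract_by_sample_py (particles : List (List (String × String))) (data_context : List (String × List String)) : List (String × List (List (String × String))) :=
  let names := pvNames data_context
  let by_sample := pvBySample particles
  -- by_sample[name] is guarded by the contains test, so getD is exact
  let ordered := names.foldl (fun o name =>
      if by_sample.contains name then o.insert name (by_sample.getD name []) else o) PySem.Dict.empty
  let ordered := by_sample.items.foldl (fun o kv =>
      if o.contains kv.1 then o else o.insert kv.1 kv.2) ordered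
  ordered.items

-- ===== PORT B =====
def extract_by_sample_py_alt (particles : List (List (String × String))) (data_context : List (String × List String)) : List (String × List (List (String × String))) :=
  let names := pvNames data_context
  let by_sample := pvBySample particles
  let rank := names.foldl (fun r name => r.setdefault name (r.size : Int)) PySem.Dict.empty
  let rank := by_sample.keys.foldl (fun r k => r.setdefault k (r.size : Int)) rank
  -- rank.__getitem__: every key of by_sample is in rank, so getD is exact
  let keys := PySem.List.sorted by_sample.keys (fun k => rank.getD k 0) false
  keys.map (fun k => (k, by_sample.getD k []))

-- ===== PRECONDITION & SPEC =====
def Spec_extract_by_sample_py (particles : List (List (String × String))) (data_context : List (String × List String)) (out : List (String × List (List (String × String)))) : Prop := out = extract_by_sample_py_alt particles data_context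
instance (particles : List (List (String × String))) (data_context : List (String × List String)) (out : List (String × List (List (String × String)))) : Decidable (Spec_extract_by_sample_py particles data_context out) := by unfold Spec_extract_by_sample_py; infer_instance

-- ===== CLAIM (what is proved, stated in full; the proofs are below) =====
def Claim_equal_extract_by_sample_py : Prop := ∀ (particles : List (List (String × String))) (data_context : List (String × List String)), Dom_extract_by_sample_py particles data_context → Spec_extract_by_sample_py particles data_context (extract_by_sample_py particles data_context)


-- ===== LEMMAS AND PROOFS =====

-- value function of the grouped dict
def pvVal (bs : PySem.Dict String (List (List (String × String)))) (k : String) : String × List (List (String × String)) := (k, bs.getD k [])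

-- the rank dict over a key list S with starting index n
def pvMkRank (S : List String) (n : Nat) : PySem.Dict String Int :=
  PySem.Dict.mk ((S.zipIdx n).map (fun p => (p.1, (p.2 : Int))))

theorem pv_keys_mk_map_val (bs : PySem.Dict String (List (List (String × String)))) (S : List String) :
    (PySem.Dict.mk (S.map (pvVal bs))).keys = S := by
  show (S.map (pvVal bs)).map Prod.fst = S
  simp [List.map_map, Function.comp_def, pvVal]

theorem pv_contains_mk_map_val (bs : PySem.Dict String (List (List (String × String)))) (S : List String) (n : String) :
    (PySem.Dict.mk (S.map (pvVal bs))).contains n = decide (n ∈ S) := by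
  rw [PySem.Dict.contains_eq_decide_mem_keys, pv_keys_mk_map_val]

theorem pv_insert_mk_map_val (bs : PySem.Dict String (List (List (String × String)))) (S : List String) (n : String) :
    (PySem.Dict.mk (S.map (pvVal bs))).insert n (bs.getD n []) = PySem.Dict.mk ((PySem.Set.add S n).map (pvVal bs)) := by
  apply PySem.Dict.ext
  by_cases hm : n ∈ S
  · rw [PySem.Dict.items_insert_of_contains _ _ (by rw [pv_contains_mk_map_val]; simpa), PySem.Set.add_of_mem hm]
    show ((S.map (pvVal bs)).map _ : List _) = S.map (pvVal bs)
    rw [List.map_map]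
    apply List.map_congr_left
    intro k _
    by_cases hk : k = n
    · simp [pvVal, hk]
    · simp [pvVal, hk]
  · rw [PySem.Dict.items_insert_of_not_contains _ _ (by rw [pv_contains_mk_map_val]; simpa), PySem.Set.add_of_not_mem hm]
    show S.map (pvVal bs) ++ [(n, bs.getD n [])] = (S ++ [n]).map (pvVal bs)
    simp [pvVal]

theorem pv_nodup_keys_bySample (particles : List (List (String × String))) :
    (pvBySample particles).keys.Nodup := by
  unfold pvBySample
  suffices h : ∀ (ps : List (List (String × String))) (d : PySem.Dict String (List (List (String × String)))), d.keys.Nodup →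
      (ps.foldl (fun d p =>
        let src := (PySem.Dict.mk p).getD "source_sample" ""
        if src ≠ "" then d.modify src [] (fun l => l ++ [p]) else d) d).keys.Nodup by
    exact h particles _ List.nodup_nil
  intro ps
  induction ps with
  | nil => intro d h; exact h
  | cons p ps ih =>
    intro d h
    rw [List.foldl_cons]
    apply ih
    dsimp only
    split
    · rw [PySem.Dict.keys_modify]
      exact PySem.Dict.nodup_keys_insert _ _ _ h
    · exact h

theorem pv_loop1 (bs : PySem.Dict String (List (List (String × String)))) :
    ∀ (ns : List String) (S : List String),
    (ns.foldl (fun o name => if bs.contains name then o.insert name (bs.getD name []) else o)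
        (PySem.Dict.mk (S.map (pvVal bs)))).items
      = (ns.foldl (fun S n => if bs.contains n then PySem.Set.add S n else S) S).map (pvVal bs) := by
  intro ns
  induction ns with
  | nil => intro S; rfl
  | cons n ns ih =>
    intro S
    rw [List.foldl_cons, List.foldl_cons]
    by_cases hc : bs.contains n
    · rw [if_pos hc, if_pos hc, pv_insert_mk_map_val, ih]
    · rw [if_neg hc, if_neg hc, ih]

theorem pv_loop2 (bs : PySem.Dict String (List (List (String × String)))) :
    ∀ (l : List (String × List (List (String × String)))) (S : List String),
    (∀ kv ∈ l, kv.2 = bs.getD kv.1 []) →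
    (l.foldl (fun o kv => if o.contains kv.1 then o else o.insert kv.1 kv.2)
        (PySem.Dict.mk (S.map (pvVal bs)))).items
      = (PySem.Set.update S (l.map (·.1))).map (pvVal bs) := by
  intro l
  induction l with
  | nil => intro S _; rfl
  | cons kv l ih =>
    intro S hv
    rw [List.foldl_cons, List.map_cons, PySem.Set.update_cons]
    by_cases hm : kv.1 ∈ S
    · rw [if_pos (by rw [pv_contains_mk_map_val]; simpa), PySem.Set.add_of_mem hm]
      exact ih S (fun x hx => hv x (List.mem_cons_of_mem _ hx))
    · rw [if_neg (by rw [pv_contains_mk_map_val]; simpa), hv kv (List.mem_cons_self),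
        pv_insert_mk_map_val, ih _ (fun x hx => hv x (List.mem_cons_of_mem _ hx))]

theorem pv_keysOf (bs : PySem.Dict String (List (List (String × String)))) :
    ∀ (ns : List String) (S : List String),
    ns.foldl (fun S n => if bs.contains n then PySem.Set.add S n else S) S
      = PySem.Set.update S (ns.filter (fun n => bs.contains n)) := by
  intro ns
  induction ns with
  | nil => intro S; rfl
  | cons n ns ih =>
    intro S
    rw [List.foldl_cons, List.filter_cons]
    by_cases hc : bs.contains n
    · rw [if_pos hc, if_pos hc, PySem.Set.update_cons, ih]
    · rw [if_neg hc, if_neg hc, ih]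

theorem pv_keys_mkRank (S : List String) (n : Nat) : (pvMkRank S n).keys = S := by
  show ((S.zipIdx n).map _).map Prod.fst = S
  induction S generalizing n with
  | nil => rfl
  | cons x xs ih => simp only [List.zipIdx_cons, List.map_cons]; simp [ih]

theorem pv_contains_mkRank (S : List String) (n : Nat) (k : String) :
    (pvMkRank S n).contains k = decide (k ∈ S) := by
  rw [PySem.Dict.contains_eq_decide_mem_keys, pv_keys_mkRank]

theorem pv_size_mkRank (S : List String) (n : Nat) : (pvMkRank S n).size = S.length := by
  show ((S.zipIdx n).map _).length = S.length
  rw [List.length_map, List.length_zipIdx]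

theorem pv_rank_loop : ∀ (l : List String) (S : List String),
    l.foldl (fun r x => r.setdefault x (r.size : Int)) (pvMkRank S 0)
      = pvMkRank (PySem.Set.update S l) 0 := by
  intro l
  induction l with
  | nil => intro S; rfl
  | cons x l ih =>
    intro S
    rw [List.foldl_cons, PySem.Set.update_cons]
    by_cases hm : x ∈ S
    · rw [PySem.Dict.setdefault_of_contains _ _ (by rw [pv_contains_mkRank]; simpa),
        PySem.Set.add_of_mem hm, ih]
    · rw [PySem.Dict.setdefault_of_not_contains _ _ (by rw [pv_contains_mkRank]; simpa),
        PySem.Set.add_of_not_mem hm]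
      have hins : (pvMkRank S 0).insert x ((pvMkRank S 0).size : Int) = pvMkRank (S ++ [x]) 0 := by
        apply PySem.Dict.ext
        rw [PySem.Dict.items_insert_of_not_contains _ _ (by rw [pv_contains_mkRank]; simpa),
          pv_size_mkRank]
        show ((S.zipIdx 0).map _ : List _) ++ [(x, (S.length : Int))] = ((S ++ [x]).zipIdx 0).map _
        rw [List.zipIdx_append]
        simp
      rw [hins, ih]

theorem pv_get?_mkRank_cons_self (x : String) (xs : List String) (n : Nat) :
    (pvMkRank (x :: xs) n).get? x = some (n : Int) := by
  show (PySem.Dict.mk (((x :: xs).zipIdx n).map (fun p => (p.1, (p.2 : Int))))).get? x = _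
  rw [List.zipIdx_cons, List.map_cons, PySem.Dict.get?_mk_cons, if_pos (by simp)]

theorem pv_get?_mkRank_cons_ne (x : String) (xs : List String) (n : Nat) (k : String) (h : x ≠ k) :
    (pvMkRank (x :: xs) n).get? k = (pvMkRank xs (n + 1)).get? k := by
  show (PySem.Dict.mk (((x :: xs).zipIdx n).map (fun p => (p.1, (p.2 : Int))))).get? k = _
  rw [List.zipIdx_cons, List.map_cons, PySem.Dict.get?_mk_cons, if_neg (by simpa)]
  rfl

theorem pv_getD_rank : ∀ (S : List String) (n : Nat) (k : String), k ∈ S →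
    (pvMkRank S n).getD k 0 = ((n + S.idxOf k : Nat) : Int) := by
  intro S
  induction S with
  | nil => intro n k h; cases h
  | cons x xs ih =>
    intro n k hk
    by_cases hx : x = k
    · subst hx
      rw [PySem.Dict.getD_eq_get?_getD, pv_get?_mkRank_cons_self]
      simp [List.idxOf_cons_self]
    · have hk' : k ∈ xs := by
        rcases List.mem_cons.mp hk with h | h
        · exact absurd h.symm hx
        · exact h
      rw [PySem.Dict.getD_eq_get?_getD, pv_get?_mkRank_cons_ne x xs n k hx,
        ← PySem.Dict.getD_eq_get?_getD, ih (n + 1) k hk',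
        List.idxOf_cons_ne _ hx]
      push_cast
      omega

theorem pv_pairwise_rank : ∀ (S : List String) (n : Nat), S.Nodup →
    S.Pairwise (fun a b => (pvMkRank S n).getD a 0 < (pvMkRank S n).getD b 0) := by
  intro S
  induction S with
  | nil => intro n _; exact List.Pairwise.nil
  | cons x xs ih =>
    intro n hnd
    rcases List.nodup_cons.mp hnd with ⟨hx, hxs⟩
    have hgx : (pvMkRank (x :: xs) n).getD x 0 = (n : Int) := by
      rw [PySem.Dict.getD_eq_get?_getD, pv_get?_mkRank_cons_self]
      rfl
    have hgb : ∀ b ∈ xs, (pvMkRank (x :: xs) n).getD b 0 = (pvMkRank xs (n + 1)).getD b 0 := by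
      intro b hb
      rw [PySem.Dict.getD_eq_get?_getD, PySem.Dict.getD_eq_get?_getD,
        pv_get?_mkRank_cons_ne x xs n b (fun he => hx (he ▸ hb))]
    constructor
    · intro b hb
      rw [hgx, hgb b hb, pv_getD_rank xs (n + 1) b hb]
      push_cast
      omega
    · exact (ih (n + 1) hxs).imp_of_mem (fun ha hb h => by rw [hgb _ ha, hgb _ hb]; exact h)

theorem pv_ofList_filter_sublist (q : String → Bool) (xs : List String) :
    (PySem.Set.ofList (xs.filter q)).Sublist (PySem.Set.ofList xs) := by
  induction xs with
  | nil => exact List.Sublist.refl _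
  | cons x xs ih =>
    rw [List.filter_cons, PySem.Set.ofList_cons]
    by_cases hq : q x
    · rw [if_pos hq, PySem.Set.ofList_cons]
      exact List.Sublist.cons₂ x (List.Sublist.filter _ ih)
    · rw [if_neg (by simpa using hq)]
      apply List.Sublist.cons
      have h1 : PySem.Set.ofList (xs.filter q)
          = (PySem.Set.ofList (xs.filter q)).filter (fun z => !z == x) := by
        refine (List.filter_eq_self.mpr ?_).symm
        intro z hz
        have hz2 : z ∈ xs.filter q := (PySem.Set.mem_ofList _ _).mp hz
        simp only [Bool.not_eq_eq_eq_not, Bool.not_true, beq_eq_false_iff_ne, ne_eq]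
        rintro rfl
        exact hq (by simpa using List.of_mem_filter hz2)
      show (PySem.Set.ofList (xs.filter q)).Sublist ((PySem.Set.ofList xs).filter (fun y => !y == x))
      rw [h1]
      exact List.Sublist.filter _ ih

theorem pv_key (names : List String) (bs : PySem.Dict String (List (List (String × String)))) (hnd : bs.keys.Nodup) :
    (bs.items.foldl (fun o kv => if o.contains kv.1 then o else o.insert kv.1 kv.2)
       (names.foldl (fun o name => if bs.contains name then o.insert name (bs.getD name []) else o)
          PySem.Dict.empty)).items
    = (PySem.List.sorted bs.keys
        (fun k => (bs.keys.foldl (fun r k => r.setdefault k (r.size : Int))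
            (names.foldl (fun r name => r.setdefault name (r.size : Int)) PySem.Dict.empty)).getD k 0)
        false).map (pvVal bs) := by
  -- A side
  have h1 : names.foldl (fun o name => if bs.contains name then o.insert name (bs.getD name []) else o)
        (PySem.Dict.empty : PySem.Dict String (List (List (String × String))))
      = PySem.Dict.mk ((PySem.Set.ofList (names.filter (fun n => bs.contains n))).map (pvVal bs)) := by
    apply PySem.Dict.ext
    show (names.foldl _ (PySem.Dict.mk (([] : List String).map (pvVal bs)))).items = _
    rw [pv_loop1, pv_keysOf, PySem.Set.update_nil_left]
  have hv : ∀ kv ∈ bs.items, kv.2 = bs.getD kv.1 [] := by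
    intro kv hkv
    exact (PySem.Dict.getD_of_mem_items bs (by rw [Prod.mk.eta]; exact hkv) hnd []).symm
  have hA : (bs.items.foldl (fun o kv => if o.contains kv.1 then o else o.insert kv.1 kv.2)
       (names.foldl (fun o name => if bs.contains name then o.insert name (bs.getD name []) else o)
          PySem.Dict.empty)).items
      = (PySem.Set.update (PySem.Set.ofList (names.filter (fun n => bs.contains n))) bs.keys).map (pvVal bs) := by
    rw [h1]
    exact pv_loop2 bs bs.items _ hv
  -- B side: the rank dict
  have hr : names.foldl (fun r name => r.setdefault name (r.size : Int)) (PySem.Dict.empty : PySem.Dict String Int)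
      = pvMkRank (PySem.Set.ofList names) 0 := by
    show (names.foldl _ (pvMkRank [] 0)) = _
    rw [pv_rank_loop, PySem.Set.update_nil_left]
  have hsorted : PySem.List.sorted bs.keys
      (fun k => (pvMkRank (PySem.Set.update (PySem.Set.ofList names) bs.keys) 0).getD k 0) false
      = PySem.Set.update (PySem.Set.ofList (names.filter (fun n => bs.contains n))) bs.keys := by
    apply PySem.List.sorted_eq_of_perm_of_pairwise_lt
    · refine (List.perm_ext_iff_of_nodup
        (PySem.Set.nodup_update _ _ (PySem.Set.nodup_ofList _)) hnd).mpr ?_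
      intro a
      simp only [PySem.Set.mem_update, PySem.Set.mem_ofList, List.mem_filter]
      constructor
      · rintro (⟨-, hc⟩ | h)
        · exact (PySem.Dict.contains_iff_mem_keys bs a).mp hc
        · exact h
      · intro h
        exact Or.inr h
    · have hRnd : (PySem.Set.update (PySem.Set.ofList names) bs.keys).Nodup :=
        PySem.Set.nodup_update _ _ (PySem.Set.nodup_ofList _)
      have hsub : (PySem.Set.update (PySem.Set.ofList (names.filter (fun n => bs.contains n))) bs.keys).Sublist
          (PySem.Set.update (PySem.Set.ofList names) bs.keys) := by
        rw [PySem.Set.update_eq_append_filter, PySem.Set.update_eq_append_filter,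
          PySem.Set.ofList_eq_self_of_nodup _ hnd]
        have hfc : ∀ y ∈ bs.keys,
            (!(PySem.Set.ofList (names.filter (fun n => bs.contains n))).contains y)
              = (!(PySem.Set.ofList names).contains y) := by
          intro y hy
          have hc : bs.contains y = true := (PySem.Dict.contains_iff_mem_keys bs y).mpr hy
          simp [PySem.Set.contains_eq_listContains, hc]
        rw [List.filter_congr hfc]
        exact List.Sublist.append (pv_ofList_filter_sublist _ _) (List.Sublist.refl _)
      exact List.Pairwise.sublist hsub
        (pv_pairwise_rank (PySem.Set.update (PySem.Set.ofList names) bs.keys) 0 hRnd)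
  rw [hA, hr, pv_rank_loop, hsorted]

-- ===== VERDICT (by name: the statement is the Claim_ definition above) =====
theorem extract_by_sample_py_spec : Claim_equal_extract_by_sample_py := by
  intro particles data_context _
  unfold Spec_extract_by_sample_py extract_by_sample_py extract_by_sample_py_alt
  exact pv_key (pvNames data_context) (pvBySample particles) (pv_nodup_keys_bySample particles)
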